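-- pv_equiv track=rewrite | github.com/jamestagal/pocket-agent-os | core/nodes/delegation.py | extract_current_task_context
-- ===== SOURCE A (Python) =====
-- from typing import Any, Dict, List, Optional
--
-- def extract_current_task_context(spec_files: Dict[str, str], task_description: str) -> str:
--     """
--     Extract the specific task context from tasks.md if available.
--     """
--     tasks_content = spec_files.get("tasks.md", "")
--     if not tasks_content:
--         return ""
--
--     # Try to find the task in the tasks.md content
--     lines = tasks_content.split('\n')
--     for i, line in enumerate(lines):
--         if task_description.lower() in line.lower():
--             # Get some context around the task (5 lines before and after)
--             start = max(0, i - 5)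
--             end = min(len(lines), i + 10)
--             context = '\n'.join(lines[start:end])
--             return f"\n\n### Current Task Context (from tasks.md)\n\n```\n{context}\n```"
--
--     return ""
-- ===== SOURCE B (Python) =====
-- def extract_current_task_context(spec_files, task_description):
--     tasks_content = spec_files.get("tasks.md", "")
--     if not tasks_content or '\n' in task_description:
--         return ""
--     low = tasks_content.lower()
--     pos = low.find(task_description.lower())
--     if pos == -1:
--         return ""
--     i = low[:pos].count('\n')
--     lines = tasks_content.split('\n')
--     start = max(0, i - 5)
--     end = min(len(lines), i + 10)
--     context = '\n'.join(lines[start:end])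
--     return f"\n\n### Current Task Context (from tasks.md)\n\n```\n{context}\n```"
-- ===== Notes on version B (the rewrite author's own statement) =====
-- stated objective: alternative
-- what changed: A lowercases and substring-tests every line of tasks.md in a loop; B lowercases the whole text once, locates the first match with a single str.find, and recovers the line index by counting newlines before the match position.
import Mathlib
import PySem

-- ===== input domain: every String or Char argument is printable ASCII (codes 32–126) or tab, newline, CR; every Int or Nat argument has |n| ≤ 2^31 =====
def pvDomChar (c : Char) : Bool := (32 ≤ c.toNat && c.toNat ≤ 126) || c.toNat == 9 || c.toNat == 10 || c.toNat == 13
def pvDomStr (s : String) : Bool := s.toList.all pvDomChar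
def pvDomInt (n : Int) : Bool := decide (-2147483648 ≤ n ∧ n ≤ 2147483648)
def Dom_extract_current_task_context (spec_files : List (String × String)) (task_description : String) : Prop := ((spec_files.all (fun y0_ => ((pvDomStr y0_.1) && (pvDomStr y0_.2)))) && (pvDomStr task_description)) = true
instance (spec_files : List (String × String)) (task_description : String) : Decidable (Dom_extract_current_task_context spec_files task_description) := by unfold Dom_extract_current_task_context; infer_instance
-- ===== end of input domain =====

-- B replaces A's per-line scan (lowercasing and substring-testing every line) by one global
-- lowercase + one `find` on the whole text, recovering the line index by counting newlines
-- before the match position (objective: alternative decomposition, same return value).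

-- ===== PORT A =====
-- shared formatting helper: both Pythons build the identical 5-before/10-after window and f-string
def pvCtxFormat (lines : List String) (i : Nat) : String :=
  let start : Int := max 0 ((i : Int) - 5)
  let stop : Int := min (PySem.List.len lines) ((i : Int) + 10)
  let context := PySem.Str.join "\n" (PySem.List.slice lines (some start) (some stop))
  "\n\n### Current Task Context (from tasks.md)\n\n```\n" ++ context ++ "\n```"

-- A's `for i, line in enumerate(lines)` with an in-loop `return`
def pvSearchA (task_description : String) (lines : List String) (i : Nat) (rest : List String) : String :=
  match rest with
  | [] => ""
  | line :: rest' =>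
    if PySem.Str.isIn (PySem.Str.lower task_description) (PySem.Str.lower line) then
      pvCtxFormat lines i
    else pvSearchA task_description lines (i + 1) rest'

def extract_current_task_context (spec_files : List (String × String)) (task_description : String) : String :=
  let tasks_content := PySem.Dict.getD ⟨spec_files⟩ "tasks.md" ""
  if tasks_content = "" then ""
  else
    let lines := (PySem.Str.split? tasks_content "\n").getD []
    pvSearchA task_description lines 0 lines

-- ===== PORT B =====
def extract_current_task_context_alt (spec_files : List (String × String)) (task_description : String) : String :=
  let tasks_content := PySem.Dict.getD ⟨spec_files⟩ "tasks.md" ""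
  if tasks_content = "" ∨ PySem.Str.isIn "\n" task_description then ""
  else
    let low := PySem.Str.lower tasks_content
    let pos := PySem.Str.find low (PySem.Str.lower task_description)
    if pos = -1 then ""
    else
      let i := PySem.Str.count (PySem.Str.slice low none (some pos)) "\n"
      pvCtxFormat ((PySem.Str.split? tasks_content "\n").getD []) i

-- ===== PRECONDITION & SPEC =====
def Spec_extract_current_task_context (spec_files : List (String × String)) (task_description : String) (out : String) : Prop := out = extract_current_task_context_alt spec_files task_description
instance (spec_files : List (String × String)) (task_description : String) (out : String) : Decidable (Spec_extract_current_task_context spec_files task_description out) := by unfold Spec_extract_current_task_context; infer_instance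

-- ===== CLAIM (what is proved, stated in full; the proofs are below) =====
def Claim_equal_extract_current_task_context : Prop := ∀ (spec_files : List (String × String)) (task_description : String), Dom_extract_current_task_context spec_files task_description → Spec_extract_current_task_context spec_files task_description (extract_current_task_context spec_files task_description)

-- ===== LEMMAS AND PROOFS =====

theorem pvLowerChar_nl (c : Char) : PySem.Chars.lowerChar c = '\n' ↔ c = '\n' := by
  unfold PySem.Chars.lowerChar PySem.Chars.isupper
  by_cases h : 'A' ≤ c ∧ c ≤ 'Z'
  · have h1 : 65 ≤ c.toNat := by
      have := h.1; rw [Char.le_def] at this; exact Nat.succ_le_of_lt this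
    have h2 : c.toNat ≤ 90 := by
      have := h.2; rw [Char.le_def] at this; exact Fin.mk_le_mk.mp this
    have hc10 : c.toNat ≠ 10 := by omega
    have hval : (Char.ofNat (c.toNat + 32)).toNat = c.toNat + 32 := by
      rw [Char.toNat_ofNat]
      have hv : (c.toNat + 32).isValidChar := by left; omega
      simp [hv]
    simp only [h.1, h.2, decide_true, Bool.and_self, if_true]
    constructor
    · intro hc
      have := congrArg Char.toNat hc
      rw [hval] at this
      have : c.toNat + 32 = 10 := this
      omega
    · intro hc
      exact absurd (by rw [hc]; rfl) hc10
  · have hd : (decide ('A' ≤ c) && decide (c ≤ 'Z')) = false := by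
      rcases (not_and_or.mp h) with h' | h' <;> simp [h']
    rw [hd]
    simp

theorem pvMem_nl_lower (l : List Char) : '\n' ∈ PySem.Chars.lower l ↔ '\n' ∈ l := by
  unfold PySem.Chars.lower
  simp only [List.mem_map]
  constructor
  · rintro ⟨a, ha, hfa⟩
    rwa [(pvLowerChar_nl a).mp hfa] at ha
  · intro h
    exact ⟨'\n', h, (pvLowerChar_nl '\n').mpr rfl⟩

-- a simple accumulator-free model of str.split('\n')
def pvMapHead (f : List Char → List Char) : List (List Char) → List (List Char)
  | [] => []
  | h :: t => f h :: t

def pvSplitNl : List Char → List (List Char)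
  | [] => [[]]
  | c :: r => if c = '\n' then [] :: pvSplitNl r else pvMapHead (fun h => c :: h) (pvSplitNl r)

theorem pvSplitNl_ne_nil (cs : List Char) : pvSplitNl cs ≠ [] := by
  induction cs with
  | nil => simp [pvSplitNl]
  | cons c r ih =>
    simp only [pvSplitNl]
    split
    · simp
    · cases hr : pvSplitNl r with
      | nil => exact absurd hr ih
      | cons h t => simp [pvMapHead]

theorem pvGo (fuel : Nat) (l cur : List Char) (acc : List (List Char)) (hf : l.length ≤ fuel) :
    PySem.Chars.splitOn.go ['\n'] fuel l cur acc =
      acc.reverse ++ pvMapHead (fun h => cur.reverse ++ h) (pvSplitNl l) := by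
  induction fuel generalizing l cur acc with
  | zero =>
    have hl : l = [] := List.eq_nil_of_length_eq_zero (Nat.le_zero.mp hf)
    subst hl
    rw [PySem.Chars.splitOn.go.eq_def]
    simp [pvSplitNl, pvMapHead]
  | succ n ih =>
    cases l with
    | nil =>
      rw [PySem.Chars.splitOn.go.eq_def]
      simp [pvSplitNl, pvMapHead]
    | cons c rest =>
      rw [PySem.Chars.splitOn.go.eq_def]
      simp only [List.length_cons] at hf
      by_cases hc : c = '\n'
      · subst hc
        have hpre : List.isPrefixOf ['\n'] ('\n' :: rest) = true := by
          simp [List.isPrefixOf]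
        simp only [hpre, if_true]
        rw [ih _ _ _ (by simpa using Nat.le_of_succ_le_succ hf)]
        cases hr : pvSplitNl rest with
        | nil => exact absurd hr (pvSplitNl_ne_nil rest)
        | cons h t =>
          simp [pvSplitNl, pvMapHead, hr]
      · have hpre : List.isPrefixOf ['\n'] (c :: rest) = false := by
          simp [List.isPrefixOf]
          intro h
          exact absurd h.symm hc
        simp only [hpre, if_false, Bool.false_eq_true]
        rw [ih _ _ _ (Nat.le_of_succ_le_succ hf)]
        cases hr : pvSplitNl rest with
        | nil => exact absurd hr (pvSplitNl_ne_nil rest)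
        | cons h t =>
          simp [pvSplitNl, pvMapHead, hr, hc]

theorem pvSplitOn_eq (cs : List Char) : PySem.Chars.splitOn cs ['\n'] = pvSplitNl cs := by
  unfold PySem.Chars.splitOn
  rw [pvGo _ _ _ _ (by omega)]
  cases hr : pvSplitNl cs with
  | nil => exact absurd hr (pvSplitNl_ne_nil cs)
  | cons h t => simp [pvMapHead]

theorem pvJoin_splitNl (cs : List Char) : PySem.Chars.join ['\n'] (pvSplitNl cs) = cs := by
  induction cs with
  | nil => simp [pvSplitNl, PySem.Chars.join_singleton]
  | cons c r ih =>
    cases hr : pvSplitNl r with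
    | nil => exact absurd hr (pvSplitNl_ne_nil r)
    | cons h t =>
      rw [hr] at ih
      by_cases hc : c = '\n'
      · subst hc
        simp only [pvSplitNl, if_true, hr]
        rw [PySem.Chars.join_cons_cons]
        simpa using ih
      · simp only [pvSplitNl, hc, if_false, hr, pvMapHead]
        cases t with
        | nil => rw [PySem.Chars.join_singleton] at ih ⊢; simp [ih]
        | cons q t' =>
          rw [PySem.Chars.join_cons_cons] at ih ⊢
          simpa using ih

theorem pvSplitNl_no_nl (cs : List Char) : ∀ l ∈ pvSplitNl cs, '\n' ∉ l := by
  induction cs with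
  | nil => simp [pvSplitNl]
  | cons c r ih =>
    intro l hl
    by_cases hc : c = '\n'
    · subst hc
      simp only [pvSplitNl, reduceIte, List.mem_cons] at hl
      rcases hl with rfl | hl
      · simp
      · exact ih l hl
    · simp only [pvSplitNl, hc, reduceIte] at hl
      cases hr : pvSplitNl r with
      | nil => exact absurd hr (pvSplitNl_ne_nil r)
      | cons h t =>
        rw [hr] at hl
        simp only [pvMapHead, List.mem_cons] at hl
        rcases hl with rfl | hl
        · intro hmem
          rcases List.mem_cons.mp hmem with h1 | h1
          · exact hc h1.symm
          · exact ih h (by rw [hr]; exact List.mem_cons_self ..) h1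
        · exact ih l (by rw [hr]; exact List.mem_cons_of_mem _ hl)

theorem pvCountGo (c : Char) (fuel : Nat) (l : List Char) (acc : Nat) (hf : l.length ≤ fuel) :
    PySem.Chars.count.go [c] fuel l acc = acc + l.count c := by
  induction fuel generalizing l acc with
  | zero =>
    have hl : l = [] := List.eq_nil_of_length_eq_zero (Nat.le_zero.mp hf)
    subst hl
    rw [PySem.Chars.count.go.eq_def]
    simp
  | succ n ih =>
    cases l with
    | nil =>
      rw [PySem.Chars.count.go.eq_def]
      simp
    | cons h t =>
      rw [PySem.Chars.count.go.eq_def]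
      simp only [List.length_cons] at hf
      by_cases hc : h = c
      · subst hc
        have hpre : List.isPrefixOf [h] (h :: t) = true := by simp [List.isPrefixOf]
        simp only [hpre, if_true]
        rw [ih _ _ (by simpa using Nat.le_of_succ_le_succ hf)]
        simp
        omega
      · have hpre : List.isPrefixOf [c] (h :: t) = false := by
          simp [List.isPrefixOf]
          intro h'
          exact absurd h'.symm hc
        simp only [hpre, Bool.false_eq_true, if_false]
        rw [ih _ _ (Nat.le_of_succ_le_succ hf)]
        simp [hc]

theorem pvCount_singleton (s : List Char) (c : Char) : PySem.Chars.count s [c] = s.count c := by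
  unfold PySem.Chars.count
  simp only [List.isEmpty_cons, if_false, Bool.false_eq_true]
  simpa using pvCountGo c s.length s 0 (le_refl _)

theorem pvFind_eq_of {s p : List Char} {k : Nat} (h1 : p <+: s.drop k)
    (h2 : ∀ i < k, ¬ p <+: s.drop i) : PySem.Chars.find s p = (k : Int) := by
  have hinf : p <:+: s := h1.isInfix.trans (List.drop_suffix k s).isInfix
  have hnn : 0 ≤ PySem.Chars.find s p := (PySem.Chars.find_nonneg_iff s p).mpr hinf
  obtain ⟨hpre, hmin⟩ := PySem.Chars.find_spec hnn
  rcases Nat.lt_trichotomy (PySem.Chars.find s p).toNat k with h | h | h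
  · exact absurd hpre (h2 _ h)
  · rw [← h, Int.toNat_of_nonneg hnn]
  · exact absurd h1 (hmin k h)

theorem pvCross {p l r : List Char} (hp : '\n' ∉ p) {j : Nat} (hj : j ≤ l.length) :
    (p <+: (l ++ '\n' :: r).drop j ↔ p <+: l.drop j) := by
  rw [List.drop_append_of_le_length hj]
  constructor
  · intro h
    by_cases hlen : p.length ≤ (l.drop j).length
    · exact (List.isPrefix_append_of_length hlen).mp h
    · exfalso
      apply hp
      obtain ⟨t, ht⟩ := h
      have hidx : ((l.drop j) ++ '\n' :: r)[(l.drop j).length]? = some '\n' := by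
        rw [List.getElem?_append_right (le_refl _)]
        simp
      rw [← ht] at hidx
      have hlt : (l.drop j).length < p.length := Nat.lt_of_not_le hlen
      rw [List.getElem?_append_left hlt] at hidx
      exact List.mem_of_getElem? hidx
  · intro h
    exact h.trans (List.prefix_append _ _)

theorem pvNoPrefix_of_find_neg {l p : List Char} (hfl : PySem.Chars.find l p = -1) :
    ∀ j, ¬ p <+: l.drop j := by
  intro j hj
  rw [PySem.Chars.find_eq_neg_one_iff] at hfl
  exact hfl (hj.isInfix.trans (List.drop_suffix j l).isInfix)

theorem pvFindSplit {p : List Char} (hp : '\n' ∉ p) (l r : List Char) :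
    PySem.Chars.find (l ++ '\n' :: r) p =
      if 0 ≤ PySem.Chars.find l p then PySem.Chars.find l p
      else if 0 ≤ PySem.Chars.find r p then (l.length : Int) + 1 + PySem.Chars.find r p
      else -1 := by
  by_cases h1 : 0 ≤ PySem.Chars.find l p
  · rw [if_pos h1]
    obtain ⟨hpre, hmin⟩ := PySem.Chars.find_spec h1
    have hkl : (PySem.Chars.find l p).toNat ≤ l.length := by
      have := PySem.Chars.find_le_length l p
      omega
    have : PySem.Chars.find (l ++ '\n' :: r) p = ((PySem.Chars.find l p).toNat : Int) := by
      apply pvFind_eq_of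
      · exact (pvCross hp hkl).mpr hpre
      · intro i hi
        rw [pvCross hp (Nat.le_trans (Nat.le_of_lt hi) hkl)]
        exact hmin i hi
    rw [this, Int.toNat_of_nonneg h1]
  · rw [if_neg h1]
    have hfl : PySem.Chars.find l p = -1 := by
      have := PySem.Chars.neg_one_le_find l p; omega
    have hnotl := pvNoPrefix_of_find_neg hfl
    have hdrop : ∀ k : Nat, (l ++ '\n' :: r).drop (l.length + 1 + k) = r.drop k := by
      intro k
      rw [show l.length + 1 + k = l.length + (1 + k) from by omega, List.drop_append]
      simp [List.drop_succ_cons, Nat.add_comm 1 k]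
    by_cases h2 : 0 ≤ PySem.Chars.find r p
    · rw [if_pos h2]
      obtain ⟨hpre, hmin⟩ := PySem.Chars.find_spec h2
      have : PySem.Chars.find (l ++ '\n' :: r) p
          = ((l.length + 1 + (PySem.Chars.find r p).toNat : Nat) : Int) := by
        apply pvFind_eq_of
        · rw [hdrop]; exact hpre
        · intro i hi
          by_cases hil : i ≤ l.length
          · rw [pvCross hp hil]
            exact hnotl i
          · have hieq : i = l.length + 1 + (i - l.length - 1) := by omega
            rw [hieq, hdrop]
            exact hmin _ (by omega)
      rw [this]
      omega
    · rw [if_neg h2]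
      have hfr : PySem.Chars.find r p = -1 := by
        have := PySem.Chars.neg_one_le_find r p; omega
      have hnotr := pvNoPrefix_of_find_neg hfr
      rw [PySem.Chars.find_eq_neg_one_iff]
      intro hinf
      have : PySem.Chars.isIn p (l ++ '\n' :: r) = true := by
        rw [PySem.Chars.isIn_iff_infix]
        exact hinf
      obtain ⟨j, hj⟩ := (PySem.Chars.exists_prefix_drop_iff_isIn p (l ++ '\n' :: r)).mpr this
      by_cases hjl : j ≤ l.length
      · exact hnotl j ((pvCross hp hjl).mp hj)
      · by_cases hjlen : j ≤ (l ++ '\n' :: r).length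
        · have hjeq : j = l.length + 1 + (j - l.length - 1) := by omega
          rw [hjeq, hdrop] at hj
          exact hnotr _ hj
        · rw [List.drop_eq_nil_of_le (by omega)] at hj
          have : p = [] := List.prefix_nil.mp hj
          subst this
          exact hnotl 0 (List.nil_prefix)

theorem pvLower_join (L : List (List Char)) :
    PySem.Chars.lower (PySem.Chars.join ['\n'] L) =
      PySem.Chars.join ['\n'] (L.map PySem.Chars.lower) := by
  induction L with
  | nil => simp [PySem.Chars.join_nil, PySem.Chars.lower]
  | cons l L ih =>
    cases L with
    | nil => simp [PySem.Chars.join_singleton]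
    | cons q rest =>
      rw [PySem.Chars.join_cons_cons, List.map_cons, List.map_cons,
        PySem.Chars.join_cons_cons]
      rw [← List.map_cons, ← ih]
      simp [PySem.Chars.lower, show PySem.Chars.lowerChar '\n' = '\n' from rfl]

theorem pvCountTake_left {m : List Char} (hm : '\n' ∉ m) {k : Nat} (hk : k ≤ m.length)
    (rest : List Char) : ((m ++ '\n' :: rest).take k).count '\n' = 0 := by
  rw [List.take_append_of_le_length hk, List.count_eq_zero]
  intro hmem
  exact hm (List.mem_of_mem_take hmem)

theorem pvCountTake_right {m : List Char} (hm : '\n' ∉ m) (k : Nat) (rest : List Char) :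
    ((m ++ '\n' :: rest).take (m.length + 1 + k)).count '\n' = (rest.take k).count '\n' + 1 := by
  rw [show m.length + 1 + k = m.length + (k + 1) from by omega, List.take_append,
    List.take_of_length_le (by omega),
    show m.length + (k + 1) - m.length = k + 1 from by omega,
    List.take_succ_cons, List.count_append, List.count_cons, List.count_eq_zero.mpr hm]
  simp

-- the central correspondence: per-line first match ↔ global find + newline count
theorem pvMain (M : List (List Char)) (p : List Char) (hM : M ≠ [])
    (hfree : ∀ m ∈ M, '\n' ∉ m) (hp : '\n' ∉ p) :
    (M.findIdx? (fun m => PySem.Chars.isIn p m) = none ∧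
      PySem.Chars.find (PySem.Chars.join ['\n'] M) p = -1) ∨
    (∃ k : Nat, PySem.Chars.find (PySem.Chars.join ['\n'] M) p = (k : Int) ∧
      M.findIdx? (fun m => PySem.Chars.isIn p m) =
        some (((PySem.Chars.join ['\n'] M).take k).count '\n')) := by
  induction M with
  | nil => exact absurd rfl hM
  | cons m M' ih =>
    have hmfree : '\n' ∉ m := hfree m (List.mem_cons_self ..)
    cases M' with
    | nil =>
      rw [PySem.Chars.join_singleton]
      by_cases h : 0 ≤ PySem.Chars.find m p
      · right
        refine ⟨(PySem.Chars.find m p).toNat, by rw [Int.toNat_of_nonneg h], ?_⟩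
        have hisin : PySem.Chars.isIn p m = true := by
          rw [PySem.Chars.isIn_iff_infix]
          exact (PySem.Chars.find_nonneg_iff m p).mp h
        rw [List.findIdx?_cons, hisin, if_pos rfl]
        have : (m.take (PySem.Chars.find m p).toNat).count '\n' = 0 := by
          rw [List.count_eq_zero]
          intro hmem
          exact hmfree (List.mem_of_mem_take hmem)
        rw [this]
      · left
        have hfl : PySem.Chars.find m p = -1 := by
          have := PySem.Chars.neg_one_le_find m p; omega
        have hisin : PySem.Chars.isIn p m = false := by
          rw [PySem.Chars.isIn_eq_false_iff]
          rw [PySem.Chars.find_eq_neg_one_iff] at hfl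
          exact hfl
        refine ⟨?_, hfl⟩
        rw [List.findIdx?_cons, hisin]
        simp
    | cons q rest =>
      have hjoin : PySem.Chars.join ['\n'] (m :: q :: rest)
          = m ++ '\n' :: PySem.Chars.join ['\n'] (q :: rest) := by
        rw [PySem.Chars.join_cons_cons]
        simp
      rw [hjoin, pvFindSplit hp m (PySem.Chars.join ['\n'] (q :: rest))]
      by_cases h : 0 ≤ PySem.Chars.find m p
      · right
        rw [if_pos h]
        refine ⟨(PySem.Chars.find m p).toNat, by rw [Int.toNat_of_nonneg h], ?_⟩
        have hisin : PySem.Chars.isIn p m = true := by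
          rw [PySem.Chars.isIn_iff_infix]
          exact (PySem.Chars.find_nonneg_iff m p).mp h
        rw [List.findIdx?_cons, hisin, if_pos rfl]
        have hkl : (PySem.Chars.find m p).toNat ≤ m.length := by
          have := PySem.Chars.find_le_length m p; omega
        rw [pvCountTake_left hmfree hkl]
      · have hfl : PySem.Chars.find m p = -1 := by
          have := PySem.Chars.neg_one_le_find m p; omega
        have hisin : PySem.Chars.isIn p m = false := by
          rw [PySem.Chars.isIn_eq_false_iff]
          rw [PySem.Chars.find_eq_neg_one_iff] at hfl
          exact hfl
        rw [if_neg h, List.findIdx?_cons, hisin]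
        simp only [Bool.false_eq_true, if_false]
        rcases ih (by simp) (fun x hx => hfree x (List.mem_cons_of_mem _ hx)) with
          ⟨hnone, hfind⟩ | ⟨k, hfind, hidx⟩
        · left
          rw [hfind, hnone]
          exact ⟨rfl, by norm_num⟩
        · right
          rw [hfind, if_pos (by positivity), hidx]
          refine ⟨m.length + 1 + k, by omega, ?_⟩
          rw [pvCountTake_right hmfree k]
          rfl

theorem pvSearchA_eq (td : String) (lines : List String) (i : Nat) (rest : List String) :
    pvSearchA td lines i rest =
      match rest.findIdx? (fun l => PySem.Str.isIn (PySem.Str.lower td) (PySem.Str.lower l)) with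
      | none => ""
      | some j => pvCtxFormat lines (i + j) := by
  induction rest generalizing i with
  | nil => simp [pvSearchA]
  | cons line rest' ih =>
    rw [List.findIdx?_cons]
    by_cases h : PySem.Str.isIn (PySem.Str.lower td) (PySem.Str.lower line) = true
    · have h2 : PySem.Chars.isIn (PySem.Chars.lower td.toList) (PySem.Chars.lower line.toList) = true := by
        simpa using h
      simp [pvSearchA, h2]
    · have h' : PySem.Str.isIn (PySem.Str.lower td) (PySem.Str.lower line) = false := by
        simpa using h
      simp only [pvSearchA, h', Bool.false_eq_true, if_false]
      rw [ih (i + 1)]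
      cases hr : rest'.findIdx? (fun l => PySem.Str.isIn (PySem.Str.lower td) (PySem.Str.lower l)) with
      | none => simp
      | some j =>
        simp only [Option.map_some]
        have : i + 1 + j = i + (j + 1) := by omega
        rw [this]

-- ===== VERDICT (by name: the statement is the Claim_ definition above) =====
theorem extract_current_task_context_spec : Claim_equal_extract_current_task_context := by
  intro spec_files td _
  unfold Spec_extract_current_task_context extract_current_task_context extract_current_task_context_alt
  by_cases hempty : PySem.Dict.getD (⟨spec_files⟩ : PySem.Dict String String) "tasks.md" "" = ""
  · simp [hempty]
  · set cs : String := PySem.Dict.getD (⟨spec_files⟩ : PySem.Dict String String) "tasks.md" "" with hcs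
    rw [if_neg hempty]
    have hlines : (PySem.Str.split? cs "\n").getD [] = (pvSplitNl cs.toList).map String.ofList := by
      simp [PySem.Str.split?, PySem.Chars.split?]
      rw [pvSplitOn_eq]
    set p : List Char := PySem.Chars.lower td.toList with hpdef
    set M : List (List Char) := (pvSplitNl cs.toList).map PySem.Chars.lower with hMdef
    have hMne : M ≠ [] := by
      rw [hMdef]
      intro hcon
      exact pvSplitNl_ne_nil cs.toList (List.map_eq_nil_iff.mp hcon)
    have hfree : ∀ m ∈ M, '\n' ∉ m := by
      intro m hm
      rw [hMdef] at hm
      obtain ⟨l, hl, rfl⟩ := List.mem_map.mp hm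
      rw [pvMem_nl_lower]
      exact pvSplitNl_no_nl _ l hl
    have hjoinM : (PySem.Str.lower cs).toList = PySem.Chars.join ['\n'] M := by
      rw [PySem.Str.toList_lower]
      conv_lhs => rw [← pvJoin_splitNl cs.toList]
      rw [pvLower_join]
    have hIdx : ((PySem.Str.split? cs "\n").getD []).findIdx?
        (fun l => PySem.Str.isIn (PySem.Str.lower td) (PySem.Str.lower l))
        = M.findIdx? (fun m => PySem.Chars.isIn p m) := by
      rw [hlines, hMdef, List.findIdx?_map, List.findIdx?_map]
      congr 1
      funext l
      simp [PySem.Str.isIn_eq, PySem.Str.toList_lower, String.toList_ofList, Function.comp]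
      rw [hpdef]
    rw [pvSearchA_eq, hIdx]
    by_cases hnl : '\n' ∈ td.toList
    · have hisin : PySem.Str.isIn "\n" td = true := by
        rw [PySem.Str.isIn_eq, show ("\n" : String).toList = ['\n'] from rfl,
          PySem.Chars.isIn_iff_infix]
        exact (List.singleton_infix_iff '\n' td.toList).mpr hnl
      rw [if_pos (Or.inr (by rw [hisin]))]
      have hnone : M.findIdx? (fun m => PySem.Chars.isIn p m) = none := by
        rw [List.findIdx?_eq_none_iff]
        intro m hm
        by_contra hcon
        have h' : PySem.Chars.isIn p m = true := by simpa using hcon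
        rw [PySem.Chars.isIn_iff_infix] at h'
        have hnp : '\n' ∈ p := by
          rw [hpdef, pvMem_nl_lower]
          exact hnl
        exact hfree m hm (h'.subset hnp)
      rw [hnone]
    · have hisinf : PySem.Str.isIn "\n" td = false := by
        rw [PySem.Str.isIn_eq, show ("\n" : String).toList = ['\n'] from rfl,
          PySem.Chars.isIn_eq_false_iff]
        intro hcon
        exact hnl ((List.singleton_infix_iff '\n' td.toList).mp hcon)
      rw [if_neg (by rw [hisinf]; simp [hempty])]
      have hp : '\n' ∉ p := by
        rw [hpdef, pvMem_nl_lower]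
        exact hnl
      have hfind : PySem.Str.find (PySem.Str.lower cs) (PySem.Str.lower td)
          = PySem.Chars.find (PySem.Chars.join ['\n'] M) p := by
        rw [PySem.Str.find_eq, hjoinM, PySem.Str.toList_lower]
      rcases pvMain M p hMne hfree hp with ⟨hnone, hf⟩ | ⟨k, hf, hidx⟩
      · rw [hnone, if_pos (by rw [hfind, hf])]
      · rw [hidx]
        rw [if_neg (by rw [hfind, hf]; omega)]
        have hcnt : PySem.Str.count
            (PySem.Str.slice (PySem.Str.lower cs) none (some (PySem.Str.find (PySem.Str.lower cs) (PySem.Str.lower td)))) "\n"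
            = ((PySem.Chars.join ['\n'] M).take k).count '\n' := by
          rw [PySem.Str.count_eq]
          rw [show (PySem.Str.slice (PySem.Str.lower cs) none
              (some (PySem.Str.find (PySem.Str.lower cs) (PySem.Str.lower td)))).toList
            = PySem.Chars.slice (PySem.Str.lower cs).toList none
              (some (PySem.Str.find (PySem.Str.lower cs) (PySem.Str.lower td))) from
            PySem.Str.toList_slice ..]
          rw [hfind, hf, PySem.Chars.slice_eq_listSlice, PySem.List.slice_to _ (by positivity)]
          rw [show ((k : Int)).toNat = k from by omega, hjoinM]
          rw [show ("\n" : String).toList = ['\n'] from rfl, pvCount_singleton]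
        rw [hcnt]
        simp
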